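-- pv_equiv track=rewrite | github.com/yamaton/atcoder | abc129/abc129_d_TLE.py | _gen_f
-- ===== SOURCE A (Python) =====
-- def _gen_f(line):
--     acc = 0
--     for c in line:
--         if c == "#":
--             for _ in range(acc):
--                 yield acc
--             yield 0
--             acc = 0
--         else:
--             acc += 1
--
--     for _ in range(acc):
--         yield acc
-- ===== SOURCE B (Python) =====
-- def _gen_f(line):
--     # Phase 1: segment the line into maximal runs [is_wall, length].
--     runs = []
--     for c in line:
--         w = (c == "#")
--         if runs and runs[-1][0] == w:
--             runs[-1][1] += 1
--         else:
--             runs.append([w, 1])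
--     # Phase 2: emit per run: a wall run of length m gives m zeros,
--     # an open run of length L gives L copies of L.
--     for w, m in runs:
--         if w:
--             for _ in range(m):
--                 yield 0
--         else:
--             for _ in range(m):
--                 yield m
-- ===== Notes on version B (the rewrite author's own statement) =====
-- stated objective: alternative
-- what changed: B first segments the line into maximal runs of walls/open cells and then emits per run (m zeros for a wall run of length m, L copies of L for an open run), instead of A's single scan that accumulates a counter and flushes it at each wall.
import Mathlib
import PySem

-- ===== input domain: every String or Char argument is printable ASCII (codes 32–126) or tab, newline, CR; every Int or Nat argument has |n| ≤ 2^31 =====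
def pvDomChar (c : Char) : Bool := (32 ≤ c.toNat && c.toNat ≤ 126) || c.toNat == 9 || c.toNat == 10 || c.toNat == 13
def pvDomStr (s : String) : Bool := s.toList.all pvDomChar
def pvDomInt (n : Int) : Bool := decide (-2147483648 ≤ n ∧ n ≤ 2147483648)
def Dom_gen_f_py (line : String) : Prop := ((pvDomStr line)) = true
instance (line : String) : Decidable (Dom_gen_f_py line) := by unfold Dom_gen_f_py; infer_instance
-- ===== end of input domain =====

-- B restructures A: it precomputes maximal runs and emits per run, instead of
-- accumulating a counter flushed at each wall; same cost (objective: alternative).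

-- ===== PORT A =====
-- single scan: state = (yielded so far, acc); each '#' flushes acc copies of acc
-- then a 0; at the end the trailing run is flushed.
def gen_f_py (line : String) : List Int :=
  let st := line.toList.foldl
    (fun (p : List Int × Nat) c =>
      if c = '#' then (p.1 ++ List.replicate p.2 (p.2 : Int) ++ [(0 : Int)], 0)
      else (p.1, p.2 + 1))
    ([], 0)
  st.1 ++ List.replicate st.2 (st.2 : Int)

-- ===== PORT B =====
-- phase 1: build the run list (head = current run, list kept reversed as usual
-- for Python's runs.append / runs[-1] update)
def gen_f_runs (line : String) : List (Bool × Nat) :=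
  (line.toList.foldl
    (fun (rs : List (Bool × Nat)) c =>
      let w : Bool := c == '#'
      match rs with
      | (w', m) :: rest => if w' == w then (w', m + 1) :: rest else (w, 1) :: (w', m) :: rest
      | [] => [(w, 1)])
    []).reverse

-- phase 2: emit per run
def gen_f_emit (r : Bool × Nat) : List Int :=
  if r.1 then List.replicate r.2 (0 : Int) else List.replicate r.2 (r.2 : Int)

def gen_f_py_alt (line : String) : List Int :=
  (gen_f_runs line).foldl (fun out r => out ++ gen_f_emit r) []

-- ===== PRECONDITION & SPEC =====
def Spec_gen_f_py (line : String) (out : List Int) : Prop := out = gen_f_py_alt line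
instance (line : String) (out : List Int) : Decidable (Spec_gen_f_py line out) := by unfold Spec_gen_f_py; infer_instance

-- ===== CLAIM (what is proved, stated in full; the proofs are below) =====
def Claim_equal_gen_f_py : Prop := ∀ (line : String), Dom_gen_f_py line → Spec_gen_f_py line (gen_f_py line)

-- ===== LEMMAS AND PROOFS =====

-- the common reference function: G acc cs = what A yields from state acc on the rest cs
def gen_f_G (acc : Nat) : List Char → List Int
  | [] => List.replicate acc (acc : Int)
  | c :: cs =>
    if c = '#' then List.replicate acc (acc : Int) ++ [(0 : Int)] ++ gen_f_G 0 cs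
    else gen_f_G (acc + 1) cs

def gen_f_loopA (p : List Int × Nat) (cs : List Char) : List Int × Nat :=
  cs.foldl
    (fun (p : List Int × Nat) c =>
      if c = '#' then (p.1 ++ List.replicate p.2 (p.2 : Int) ++ [(0 : Int)], 0)
      else (p.1, p.2 + 1)) p

theorem gen_f_py_eq_loopA (line : String) :
    gen_f_py line =
      (gen_f_loopA ([], 0) line.toList).1
        ++ List.replicate (gen_f_loopA ([], 0) line.toList).2
            ((gen_f_loopA ([], 0) line.toList).2 : Int) := rfl

-- A's loop, characterized against G
theorem gen_f_A_char (cs : List Char) : ∀ (out : List Int) (acc : Nat),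
    (gen_f_loopA (out, acc) cs).1
      ++ List.replicate (gen_f_loopA (out, acc) cs).2 ((gen_f_loopA (out, acc) cs).2 : Int)
    = out ++ gen_f_G acc cs := by
  induction cs with
  | nil => intro out acc; simp [gen_f_loopA, gen_f_G]
  | cons c cs ih =>
    intro out acc
    by_cases h : c = '#'
    · simp only [gen_f_loopA, List.foldl_cons, if_pos h] at *
      rw [ih]; simp [gen_f_G, h]
    · simp only [gen_f_loopA, List.foldl_cons, if_neg h] at *
      rw [ih]; simp [gen_f_G, h]

-- E rs = what B emits from the (reversed) partial run list rs
def gen_f_E (rs : List (Bool × Nat)) : List Int :=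
  rs.reverse.foldl (fun out r => out ++ gen_f_emit r) []

theorem gen_f_E_cons (r : Bool × Nat) (rs : List (Bool × Nat)) :
    gen_f_E (r :: rs) = gen_f_E rs ++ gen_f_emit r := by
  simp [gen_f_E]

def gen_f_foldRuns (rs : List (Bool × Nat)) (cs : List Char) : List (Bool × Nat) :=
  cs.foldl
    (fun (rs : List (Bool × Nat)) c =>
      let w : Bool := c == '#'
      match rs with
      | (w', m) :: rest => if w' == w then (w', m + 1) :: rest else (w, 1) :: (w', m) :: rest
      | [] => [(w, 1)])
    rs

-- joint invariant of B's two phases, for the three shapes of the partial run list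
theorem gen_f_B_char (cs : List Char) :
    (gen_f_E (gen_f_foldRuns [] cs) = gen_f_G 0 cs)
    ∧ (∀ rest m, gen_f_E (gen_f_foldRuns ((false, m) :: rest) cs)
          = gen_f_E rest ++ gen_f_G m cs)
    ∧ (∀ rest k, gen_f_E (gen_f_foldRuns ((true, k) :: rest) cs)
          = gen_f_E rest ++ List.replicate k (0 : Int) ++ gen_f_G 0 cs) := by
  induction cs with
  | nil =>
    refine ⟨by simp [gen_f_foldRuns, gen_f_E, gen_f_G], ?_, ?_⟩
    · intro rest m; simp [gen_f_foldRuns, gen_f_E_cons, gen_f_emit, gen_f_G]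
    · intro rest k; simp [gen_f_foldRuns, gen_f_E_cons, gen_f_emit, gen_f_G]
  | cons c cs ih =>
    obtain ⟨ih0, ihO, ihW⟩ := ih
    by_cases h : c = '#'
    · have hw : (c == '#') = true := by simp [h]
      refine ⟨?_, ?_, ?_⟩
      · have := ihW [] 1
        simp only [gen_f_foldRuns, List.foldl_cons, hw] at this ⊢
        rw [this]; simp [gen_f_G, h, gen_f_E]
      · intro rest m
        have := ihW ((false, m) :: rest) 1
        simp only [gen_f_foldRuns, List.foldl_cons, hw] at this ⊢
        simp only [Bool.false_eq_true, beq_iff_eq, if_false] at this ⊢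
        rw [this]; simp [gen_f_G, h, gen_f_E_cons, gen_f_emit]
      · intro rest k
        have := ihW rest (k + 1)
        simp only [gen_f_foldRuns, List.foldl_cons, hw] at this ⊢
        simp only [beq_self_eq_true, if_true] at this ⊢
        rw [this]
        simp [gen_f_G, h, List.replicate_succ' (n := k)]
    · have hw : (c == '#') = false := by simp [h]
      refine ⟨?_, ?_, ?_⟩
      · have := ihO [] 1
        simp only [gen_f_foldRuns, List.foldl_cons, hw] at this ⊢
        rw [this]; simp [gen_f_G, h, gen_f_E]
      · intro rest m
        have := ihO rest (m + 1)
        simp only [gen_f_foldRuns, List.foldl_cons, hw] at this ⊢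
        simp only [beq_self_eq_true, if_true] at this ⊢
        rw [this]; simp [gen_f_G, h]
      · intro rest k
        have := ihO ((true, k) :: rest) 1
        simp only [gen_f_foldRuns, List.foldl_cons, hw] at this ⊢
        simp only [Bool.true_eq_false, beq_iff_eq, if_false] at this ⊢
        rw [this]
        simp [gen_f_G, h, gen_f_E_cons, gen_f_emit, List.append_assoc]

theorem gen_f_alt_eq_E (line : String) :
    gen_f_py_alt line = gen_f_E (gen_f_foldRuns [] line.toList) := rfl

-- ===== VERDICT (by name: the statement is the Claim_ definition above) =====
theorem gen_f_py_spec : Claim_equal_gen_f_py := by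
  intro line _
  show gen_f_py line = gen_f_py_alt line
  rw [gen_f_py_eq_loopA, gen_f_A_char, gen_f_alt_eq_E, (gen_f_B_char line.toList).1]
  simp
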